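-- pv_equiv track=rewrite | github.com/wittmaan/AdventOfCode2023 | python/day07.py | count_ranks
-- ===== SOURCE A (Python) =====
-- from collections import Counter
--
-- def count_ranks(hand: str, mode: str = "part1") -> list[int]:
--     if mode == "part1":
--         return sorted(Counter(hand).values(), reverse=True)
--     else:
--         if "J" in hand and hand != "JJJJJ":
--             highest = max(hand.replace("J", ""), key=hand.replace("J", "").count)
--             hand = hand.replace("J", highest)
--         return sorted(list(hand.count(c) for c in set(hand)), reverse=True)
-- ===== SOURCE B (Python) =====
-- def count_ranks(hand: str, mode: str = "part1") -> list[int]: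
--     # Sort the hand and run-length encode it; jokers are stripped up front and
--     # their count is added to the head of the descending run-length list.
--     if mode == "part1" or hand == "JJJJJ":
--         cards, jokers = sorted(hand), 0
--     else:
--         cards = sorted(c for c in hand if c != "J")
--         jokers = len(hand) - len(cards)
--     counts = []
--     prev = None
--     for c in cards:
--         if c == prev:
--             counts[-1] += 1
--         else:
--             counts.append(1)
--             prev = c
--     counts.sort(reverse=True)
--     if jokers:
--         counts[0] += jokers
--     return counts
-- ===== Notes on version B (the rewrite author's own statement) =====
-- stated objective: alternative
-- what changed: B never builds a frequency table and never searches for a most-common card: it sorts the hand's characters and run-length-encodes the sorted list to get the counts, strips jokers up front (part 2), and adds the joker count to the head of the descending count list instead of merging it into a chosen card before counting.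
import Mathlib
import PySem

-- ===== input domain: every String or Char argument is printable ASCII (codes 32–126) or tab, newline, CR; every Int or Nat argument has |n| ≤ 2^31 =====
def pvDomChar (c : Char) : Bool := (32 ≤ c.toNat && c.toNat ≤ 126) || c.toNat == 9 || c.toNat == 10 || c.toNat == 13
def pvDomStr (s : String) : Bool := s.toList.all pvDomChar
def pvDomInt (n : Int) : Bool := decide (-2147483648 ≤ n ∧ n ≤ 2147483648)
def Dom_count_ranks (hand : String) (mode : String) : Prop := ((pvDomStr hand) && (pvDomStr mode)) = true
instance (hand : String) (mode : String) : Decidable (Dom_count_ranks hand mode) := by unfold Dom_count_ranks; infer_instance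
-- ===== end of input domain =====

-- B replaces A's frequency-table-and-most-common-card approach by sort + run-length encoding:
-- it sorts the hand, run-length-encodes the sorted characters, and (part 2) strips jokers up
-- front and adds their number to the head of the descending count list; objective: alternative.

-- ===== PORT A =====
def count_ranks (hand : String) (mode : String) : List Int :=
  if mode == "part1" then
    PySem.List.sorted (PySem.Dict.counter hand.toList).values (fun v => v) true
  else
    let hand :=
      if PySem.Str.isIn "J" hand && hand != "JJJJJ" then
        -- max(hand.replace("J",""), key=hand.replace("J","").count); raises ValueError on an
        -- empty string, which Pre_ excludes, so the maxD default is never used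
        let stripped := PySem.Str.replace hand "J" ""
        let highest := PySem.List.maxD stripped.toList
          (fun c => PySem.Chars.count stripped.toList [c]) ' '
        PySem.Str.replace hand "J" (String.ofList [highest])
      else hand
    PySem.List.sorted
      ((PySem.Set.ofList hand.toList).map (fun c => (PySem.Chars.count hand.toList [c] : Int)))
      (fun v => v) true

-- ===== PORT B =====
-- counts[-1] += 1 on a nonempty list (the loop guarantees counts ≠ [] when it runs this line)
def pvIncrLast : List Int → List Int
  | [] => []
  | [x] => [x + 1]
  | x :: y :: t => x :: pvIncrLast (y :: t)

def count_ranks_alt (hand : String) (mode : String) : List Int :=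
  let p :=
    if mode == "part1" || hand == "JJJJJ" then
      (PySem.List.sorted hand.toList (fun c => c) false, (0 : Int))
    else
      let cards := PySem.List.sorted (hand.toList.filter (fun c => !(c == 'J'))) (fun c => c) false
      (cards, (hand.toList.length : Int) - (cards.length : Int))
  let st := p.1.foldl (fun (st : List Int × Option Char) c =>
      if some c == st.2 then (pvIncrLast st.1, st.2) else (st.1 ++ [1], some c)) ([], none)
  let counts := PySem.List.sorted st.1 (fun v => v) true
  if p.2 != 0 then
    match counts with
    | [] => []            -- Python raises IndexError here (counts[0] on an empty list); Pre_ excludes these inputs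
    | h :: t => (h + p.2) :: t
  else counts

-- ===== PRECONDITION & SPEC =====
-- Pre_ excludes exactly the inputs where A raises ValueError (max() of an empty sequence):
-- a part-2 hand made only of 'J's that is not "JJJJJ" (e.g. "J", "JJ"); B also raises there (IndexError).
def Pre_count_ranks (hand : String) (mode : String) : Prop :=
  mode = "part1" ∨ hand = "JJJJJ" ∨ hand.toList.contains 'J' = false
    ∨ hand.toList.all (fun c => c == 'J') = false
instance (hand : String) (mode : String) : Decidable (Pre_count_ranks hand mode) := by
  unfold Pre_count_ranks; infer_instance
def pvWitness_count_ranks : String × String := ("T55J5", "part2")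

def Spec_count_ranks (hand : String) (mode : String) (out : List Int) : Prop := out = count_ranks_alt hand mode
instance (hand : String) (mode : String) (out : List Int) : Decidable (Spec_count_ranks hand mode out) := by unfold Spec_count_ranks; infer_instance

-- ===== CLAIM (what is proved, stated in full; the proofs are below) =====
def Claim_equal_count_ranks : Prop := ∀ (hand : String) (mode : String), Dom_count_ranks hand mode → Pre_count_ranks hand mode → Spec_count_ranks hand mode (count_ranks hand mode)

-- ===== LEMMAS AND PROOFS =====

-- run lengths of a list, one run at a time (specification of B's loop)
def rleSpec : List Char → List Int
  | [] => []
  | a :: t => ((t.takeWhile (· == a)).length + 1 : Int) :: rleSpec (t.dropWhile (· == a))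
  termination_by l => l.length
  decreasing_by
    simp only [List.length_cons]
    exact Nat.lt_succ_of_le (List.length_dropWhile_le _ _)

theorem pv_count_go (c : Char) : ∀ (l : List Char) (fuel acc : Nat), l.length ≤ fuel →
    PySem.Chars.count.go [c] fuel l acc = acc + l.count c := by
  intro l
  induction l with
  | nil => intro fuel acc h; cases fuel <;> simp [PySem.Chars.count.go]
  | cons x t ih =>
    intro fuel acc h
    cases fuel with
    | zero => simp at h
    | succ f =>
      by_cases hx : c = x
      · subst hx
        simp [PySem.Chars.count.go, List.isPrefixOf, ih f (acc+1) (by simpa using h)]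
        omega
      · simp [PySem.Chars.count.go, List.isPrefixOf, Ne.symm hx,
          ih f acc (by simpa using h), hx]

theorem pv_count_single (l : List Char) (c : Char) :
    PySem.Chars.count l [c] = l.count c := by
  simp [PySem.Chars.count, pv_count_go c l l.length 0 le_rfl]

theorem pv_replace_go (o : Char) (ns : List Char) : ∀ (l : List Char) (fuel : Nat) (acc : List Char),
    l.length ≤ fuel →
    PySem.Chars.replace.go [o] ns fuel l acc
      = acc.reverse ++ l.flatMap (fun x => if x = o then ns else [x]) := by
  intro l
  induction l with
  | nil => intro fuel acc h; cases fuel <;> simp [PySem.Chars.replace.go]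
  | cons x t ih =>
    intro fuel acc h
    cases fuel with
    | zero => simp at h
    | succ f =>
      by_cases hx : o = x
      · subst hx
        simp [PySem.Chars.replace.go, List.isPrefixOf, ih f _ (by simpa using h)]
      · simp [PySem.Chars.replace.go, List.isPrefixOf, hx,
          ih f _ (by simpa using h), Ne.symm hx]

theorem pv_replace_single (l : List Char) (o : Char) (ns : List Char) :
    PySem.Chars.replace l [o] ns = l.flatMap (fun x => if x = o then ns else [x]) := by
  simp [PySem.Chars.replace, pv_replace_go o ns l l.length [] le_rfl]

theorem pv_replace_nil (l : List Char) (o : Char) :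
    PySem.Chars.replace l [o] [] = l.filter (fun x => !(x == o)) := by
  rw [pv_replace_single]
  induction l with
  | nil => simp
  | cons x t ih => by_cases hx : x = o <;> simp [hx, ih]

theorem pv_replace_one (l : List Char) (o n : Char) :
    PySem.Chars.replace l [o] [n] = l.map (fun x => if x = o then n else x) := by
  rw [pv_replace_single]
  induction l with
  | nil => simp
  | cons x t ih => by_cases hx : x = o <;> simp [hx, ih]

theorem pv_count_map_repl (l : List Char) (o h c : Char) (hho : h ≠ o) :
    (l.map (fun x => if x = o then h else x)).count c
      = if c = o then 0 else if c = h then l.count c + l.count o else l.count c := by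
  induction l with
  | nil => simp only [List.map_nil, List.count_nil]; split_ifs <;> rfl
  | cons x t ih =>
    by_cases hx : x = o
    · subst hx
      simp only [List.map_cons, List.count_cons, ih]
      split_ifs with h1 h2 <;> simp_all <;> omega
    · simp only [List.map_cons, if_neg hx, List.count_cons, ih]
      split_ifs with h1 h2 <;> simp_all <;> omega

theorem pv_mem_map_repl (l : List Char) (o h x : Char) (hh : h ∈ l) (hho : h ≠ o) :
    x ∈ l.map (fun y => if y = o then h else y) ↔ x ∈ l ∧ x ≠ o := by
  constructor
  · rintro hm
    obtain ⟨y, hy, hgy⟩ := List.mem_map.1 hm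
    by_cases hyo : y = o
    · simp [hyo] at hgy; subst hgy; exact ⟨hh, hho⟩
    · simp [hyo] at hgy; subst hgy; exact ⟨hy, hyo⟩
  · rintro ⟨hxl, hxo⟩
    exact List.mem_map.2 ⟨x, hxl, by simp [hxo]⟩

theorem pv_map_perm_cons_erase {α β : Type} [DecidableEq α] (K : List α) (f : α → β) (x : α)
    (hx : x ∈ K) : (K.map f).Perm (f x :: (K.erase x).map f) := by
  simpa using (List.perm_cons_erase hx).map f

theorem pv_bump_perm (K : List Char) (f : Char → Int) (j : Int) (x : Char)
    (hnd : K.Nodup) (hx : x ∈ K) :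
    (K.map (fun c => if c = x then f c + j else f c)).Perm ((f x + j) :: (K.erase x).map f) := by
  refine ((pv_map_perm_cons_erase K _ x hx).trans ?_)
  simp only [if_pos]
  refine List.Perm.cons _ ?_
  rw [List.map_congr_left]
  intro a ha
  have : a ≠ x := by
    intro h; subst h; exact (List.Nodup.not_mem_erase hnd) ha
  simp [this]

theorem pv_sortedDesc_eq (xs ys : List Int) (hp : ys.Perm xs)
    (hpw : ys.Pairwise (fun a b => b ≤ a)) :
    PySem.List.sorted xs (fun v => v) true = ys := by
  have s1 := PySem.List.sorted_pairwise_rev xs (fun v : Int => v)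
  have hperm : (PySem.List.sorted xs (fun v => v) true).Perm ys :=
    (PySem.List.sorted_perm (xs := xs) (key := fun v : Int => v) (rev := true)).trans hp.symm
  exact hperm.eq_of_pairwise (fun a b _ _ h1 h2 => le_antisymm h2 h1) s1 hpw

theorem pv_sorted_rev_perm_eq (xs ys : List Int) (hp : xs.Perm ys) :
    PySem.List.sorted xs (fun v => v) true = PySem.List.sorted ys (fun v => v) true := by
  refine pv_sortedDesc_eq _ _ ?_ (PySem.List.sorted_pairwise_rev ys (fun v : Int => v))
  exact (PySem.List.sorted_perm (xs := ys) (key := fun v : Int => v) (rev := true)).trans hp.symm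

theorem pv_values_counter (l : List Char) :
    (PySem.Dict.counter l).values
      = (PySem.Set.ofList l).map (fun k => (l.count k : Int)) := by
  simp [PySem.Dict.values, PySem.Dict.items_counter, List.map_map, Function.comp]

-- helper: Str.isIn "J" is membership of 'J'
theorem pv_isIn_J (s : String) : PySem.Str.isIn "J" s = s.toList.contains 'J' := by
  rw [Bool.eq_iff_iff, PySem.Str.isIn_iff_infix]
  have hJ : ("J" : String).toList = ['J'] := by decide
  rw [hJ, List.singleton_infix_iff]
  simp

theorem pv_incrLast_append (cs : List Int) (n : Int) :
    pvIncrLast (cs ++ [n]) = cs ++ [n + 1] := by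
  induction cs with
  | nil => simp [pvIncrLast]
  | cons x t ih =>
    cases t with
    | nil => simp [pvIncrLast]
    | cons y r => simpa [pvIncrLast] using ih

-- B's loop, run from an open run (n copies of p so far), produces the run lengths
theorem pv_fold_rle : ∀ (l : List Char) (cs : List Int) (n : Int) (p : Char),
    l.Pairwise (· ≤ ·) → (∀ x ∈ l, p ≤ x) →
    (l.foldl (fun (st : List Int × Option Char) c =>
        if some c == st.2 then (pvIncrLast st.1, st.2) else (st.1 ++ [1], some c))
      (cs ++ [n], some p)).1
      = cs ++ [n + ((l.takeWhile (· == p)).length : Int)] ++ rleSpec (l.dropWhile (· == p)) := by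
  intro l
  induction l with
  | nil => intro cs n p _ _; simp [rleSpec]
  | cons c t ih =>
    intro cs n p hpw hall
    by_cases hc : c = p
    · subst hc
      have hstep : (if some c == some c then (pvIncrLast (cs ++ [n]), some c)
          else ((cs ++ [n]) ++ [1], some c)) = (cs ++ [n + 1], some c) := by
        simp [pv_incrLast_append]
      simp only [List.foldl_cons, hstep]
      rw [ih cs (n + 1) c hpw.tail (fun x hx => hall x (List.mem_cons_of_mem _ hx))]
      simp only [List.takeWhile_cons, BEq.rfl, if_pos, List.dropWhile_cons]
      simp only [List.length_cons]
      have harith : n + 1 + ((t.takeWhile (· == c)).length : Int)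
          = n + (((t.takeWhile (· == c)).length + 1 : Nat) : Int) := by push_cast; ring
      rw [harith]
    · have hbe : (some c == some p) = false := by simp [hc]
      simp only [List.foldl_cons, hbe, Bool.false_eq_true, if_false]
      rw [ih (cs ++ [n]) 1 c hpw.tail
        (fun x hx => List.rel_of_pairwise_cons hpw hx)]
      have ht : (c :: t).takeWhile (· == p) = [] := by
        simp [hc]
      have hd : (c :: t).dropWhile (· == p) = c :: t := by
        simp [hc]
      rw [ht, hd]
      show (cs ++ [n]) ++ [1 + ((t.takeWhile (· == c)).length : Int)]
          ++ rleSpec (t.dropWhile (· == c)) = _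
      simp [rleSpec]
      omega

-- on a ≤-sorted list, the run lengths are (as a multiset) the per-distinct-element counts
theorem pv_rleSpec_perm : ∀ (l : List Char), l.Pairwise (· ≤ ·) →
    (rleSpec l).Perm ((PySem.Set.ofList l).map (fun c => (l.count c : Int))) := by
  intro l
  induction l using rleSpec.induct with
  | case1 => intro _; simp [rleSpec, PySem.Set.ofList]
  | case2 a t ih =>
    intro hpw
    have hpwt : t.Pairwise (· ≤ ·) := hpw.tail
    have hpr : (t.dropWhile (· == a)).Pairwise (· ≤ ·) :=
      hpwt.sublist (List.dropWhile_sublist _)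
    have hw : ∀ x ∈ t.takeWhile (· == a), x = a := by
      intro x hx
      simpa using List.mem_takeWhile_imp hx
    have hna : ∀ x ∈ t.dropWhile (· == a), x ≠ a := by
      cases hr : t.dropWhile (· == a) with
      | nil => simp
      | cons h rr =>
        have hh : (h == a) = false := by
          have := List.head_dropWhile_not (· == a) (l := t) (by simp [hr])
          simpa [hr] using this
        have hh' : h ≠ a := by simpa using hh
        have hhm : h ∈ t := (List.dropWhile_sublist (l := t) (· == a)).mem (by simp [hr])
        have hah : a ≤ h := List.rel_of_pairwise_cons hpw hhm
        have hprr : (h :: rr).Pairwise (· ≤ ·) := hr ▸ hpr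
        intro x hx
        rcases List.mem_cons.1 hx with hxh | hxr
        · exact hxh ▸ hh'
        · have : h ≤ x := List.rel_of_pairwise_cons hprr hxr
          intro hxa
          exact hh' (le_antisymm (hxa ▸ this) hah)
    have hsplit : (a :: t) = a :: (t.takeWhile (· == a) ++ t.dropWhile (· == a)) := by
      rw [List.takeWhile_append_dropWhile]
    have hcount_a : (a :: t).count a = (t.takeWhile (· == a)).length + 1 := by
      rw [hsplit]
      rw [List.count_cons_self, List.count_append]
      rw [List.count_eq_length.2 (fun b hb => (hw b hb).symm),
        List.count_eq_zero.2 (fun hm => hna a hm rfl)]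
    have hcount_c : ∀ c, c ≠ a → (a :: t).count c = (t.dropWhile (· == a)).count c := by
      intro c hc
      have h1 : (t.takeWhile (· == a)).count c = 0 :=
        List.count_eq_zero.2 (fun hm => hc (hw c hm))
      have ht' : List.count c t = List.count c (t.takeWhile (· == a) ++ t.dropWhile (· == a)) := by
        rw [List.takeWhile_append_dropWhile]
      rw [List.count_cons, if_neg (by simp [Ne.symm hc]), Nat.add_zero, ht', List.count_append, h1,
        Nat.zero_add]
    have hmem : ∀ x, x ∈ (a :: t) ↔ x = a ∨ x ∈ t.dropWhile (· == a) := by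
      intro x
      rw [hsplit]
      simp only [List.mem_cons, List.mem_append]
      constructor
      · rintro (h | h | h)
        · exact Or.inl h
        · exact Or.inl (hw x h)
        · exact Or.inr h
      · rintro (h | h)
        · exact Or.inl h
        · exact Or.inr (Or.inr h)
    have hsetperm : (PySem.Set.ofList (a :: t)).Perm (a :: PySem.Set.ofList (t.dropWhile (· == a))) := by
      rw [List.perm_ext_iff_of_nodup (PySem.Set.nodup_ofList _)
        (List.nodup_cons.2 ⟨fun hm => hna a ((PySem.Set.mem_ofList _ _).1 hm) rfl,
          PySem.Set.nodup_ofList _⟩)]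
      intro x
      rw [PySem.Set.mem_ofList, hmem x, List.mem_cons, PySem.Set.mem_ofList]
    have hrle : rleSpec (a :: t)
        = (((t.takeWhile (· == a)).length + 1 : Nat) : Int) :: rleSpec (t.dropWhile (· == a)) := by
      rw [rleSpec]
      push_cast
      ring_nf
    rw [hrle]
    refine List.Perm.trans (List.Perm.cons _ (ih hpr)) ?_
    have hmapr : (PySem.Set.ofList (t.dropWhile (· == a))).map
          (fun c => ((t.dropWhile (· == a)).count c : Int))
        = (PySem.Set.ofList (t.dropWhile (· == a))).map (fun c => ((a :: t).count c : Int)) := by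
      apply List.map_congr_left
      intro c hc
      rw [hcount_c c (hna c ((PySem.Set.mem_ofList _ _).1 hc))]
    rw [hmapr]
    have := (hsetperm.map (fun c => ((a :: t).count c : Int))).symm
    simpa [hcount_a] using this

-- B's whole tally pipeline on any list l equals the sorted-descending per-element counts
theorem pv_btally (l : List Char) :
    PySem.List.sorted
      (((PySem.List.sorted l (fun c => c) false).foldl (fun (st : List Int × Option Char) c =>
          if some c == st.2 then (pvIncrLast st.1, st.2) else (st.1 ++ [1], some c))
        ([], none)).1) (fun v => v) true
    = PySem.List.sorted ((PySem.Set.ofList l).map (fun c => (l.count c : Int)))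
        (fun v => v) true := by
  have hpw : (PySem.List.sorted l (fun c => c) false).Pairwise (· ≤ ·) := by
    simpa using PySem.List.sorted_pairwise l (fun c : Char => c)
  have hperm : (PySem.List.sorted l (fun c => c) false).Perm l := PySem.List.sorted_perm l _ false
  have hfold : ((PySem.List.sorted l (fun c => c) false).foldl
      (fun (st : List Int × Option Char) c =>
        if some c == st.2 then (pvIncrLast st.1, st.2) else (st.1 ++ [1], some c))
      ([], none)).1 = rleSpec (PySem.List.sorted l (fun c => c) false) := by
    cases hsc : PySem.List.sorted l (fun c => c) false with
    | nil => simp [rleSpec]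
    | cons c t =>
      have hpw' : (c :: t).Pairwise (· ≤ ·) := hsc ▸ hpw
      have hstep1 : (if some c == (none : Option Char) then
          (pvIncrLast ([] : List Int), (none : Option Char)) else (([] : List Int) ++ [1], some c))
          = ([] ++ [(1 : Int)], some c) := by rfl
      simp only [List.foldl_cons, hstep1]
      rw [pv_fold_rle t [] 1 c hpw'.tail (fun x hx => List.rel_of_pairwise_cons hpw' hx)]
      have harith : (1 : Int) + ((t.takeWhile (· == c)).length : Int)
          = ((t.takeWhile (· == c)).length : Int) + 1 := by ring
      simp [rleSpec, harith]
  rw [hfold]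
  apply pv_sorted_rev_perm_eq
  refine (pv_rleSpec_perm _ hpw).trans ?_
  have hmapeq : (PySem.Set.ofList (PySem.List.sorted l (fun c => c) false)).map
        (fun c => ((PySem.List.sorted l (fun c => c) false).count c : Int))
      = (PySem.Set.ofList (PySem.List.sorted l (fun c => c) false)).map
        (fun c => (l.count c : Int)) := by
    apply List.map_congr_left
    intro c _
    rw [hperm.count_eq]
  rw [hmapeq]
  apply List.Perm.map
  rw [List.perm_ext_iff_of_nodup (PySem.Set.nodup_ofList _) (PySem.Set.nodup_ofList _)]
  intro x
  rw [PySem.Set.mem_ofList, PySem.Set.mem_ofList]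
  exact hperm.mem_iff

theorem pv_len_filterJ (l : List Char) :
    (l.filter (fun c => !(c == 'J'))).length + l.count 'J' = l.length := by
  rw [List.count]
  induction l with
  | nil => rfl
  | cons x t ih =>
    by_cases hx : x = 'J' <;> simp [hx] <;> omega

-- ===== VERDICT (by name: the statement is the Claim_ definition above) =====
theorem count_ranks_spec : Claim_equal_count_ranks := by
  intro hand mode _ hpre
  unfold Spec_count_ranks
  by_cases hm : mode = "part1"
  · subst hm
    have h1 : (("part1" : String) == "part1") = true := by decide
    simp only [count_ranks, count_ranks_alt, h1, Bool.true_or, if_true, bne_self_eq_false,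
      Bool.false_eq_true, if_false]
    rw [pv_values_counter]
    exact (pv_btally hand.toList).symm
  · have hmb : (mode == "part1") = false := by simp [hm]
    by_cases h5 : hand = "JJJJJ"
    · subst h5
      have hA : count_ranks "JJJJJ" mode = [5] := by
        simp only [count_ranks, hmb, Bool.false_eq_true, if_false]
        decide
      have hB : count_ranks_alt "JJJJJ" mode = [5] := by
        simp only [count_ranks_alt, hmb, Bool.false_or]
        decide
      rw [hA, hB]
    · have h5b : (hand == "JJJJJ") = false := by simp [h5]
      simp only [count_ranks, count_ranks_alt, hmb, h5b, Bool.false_or, Bool.false_eq_true,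
        if_false]
      by_cases hJ : 'J' ∈ hand.toList
      · -- joker-merge case
        have hex : ∃ c ∈ hand.toList, c ≠ 'J' := by
          rcases hpre with h | h | h | h
          · exact absurd h hm
          · exact absurd h h5
          · exact absurd hJ (by simpa using h)
          · simpa using List.all_eq_false.1 h
        obtain ⟨c0, hc0, hc0ne⟩ := hex
        have hA : (PySem.Str.isIn "J" hand && hand != "JJJJJ") = true := by
          rw [pv_isIn_J]; simp [hJ, h5]
        rw [hA]
        simp only [if_true]
        -- A side: the stripped string is a filter
        have hsJ : ("J" : String).toList = ['J'] := by decide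
        have hsE : ("" : String).toList = ([] : List Char) := by decide
        have hrepl0 : (PySem.Str.replace hand "J" "").toList
            = hand.toList.filter (fun x => !(x == 'J')) := by
          rw [PySem.Str.toList_replace, hsJ, hsE, pv_replace_nil]
        rw [hrepl0]
        simp only [pv_count_single]
        -- name the chosen replacement card m
        have hFne : hand.toList.filter (fun x => !(x == 'J')) ≠ [] :=
          List.ne_nil_of_mem (List.mem_filter.2 ⟨hc0, by simp [hc0ne]⟩)
        obtain ⟨m, hmax?⟩ : ∃ m, PySem.List.max? (hand.toList.filter (fun x => !(x == 'J')))
            (fun c => List.count c (hand.toList.filter (fun x => !(x == 'J')))) = some m := by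
          cases h : PySem.List.max? (hand.toList.filter (fun x => !(x == 'J')))
              (fun c => List.count c (hand.toList.filter (fun x => !(x == 'J')))) with
          | none => exact absurd ((PySem.List.max?_eq_none_iff _ _).1 h) hFne
          | some m => exact ⟨m, rfl⟩
        have hMD : PySem.List.maxD (hand.toList.filter (fun x => !(x == 'J')))
            (fun c => List.count c (hand.toList.filter (fun x => !(x == 'J')))) ' ' = m := by
          simp [PySem.List.maxD, hmax?]
        rw [hMD]
        have hofm : (String.ofList [m]).toList = [m] := by simp
        have hrepl1 : (PySem.Str.replace hand "J" (String.ofList [m])).toList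
            = hand.toList.map (fun x => if x = 'J' then m else x) := by
          rw [PySem.Str.toList_replace, hsJ, hofm, pv_replace_one]
        rw [hrepl1]
        have hmF : m ∈ hand.toList.filter (fun x => !(x == 'J')) := PySem.List.max?_mem hmax?
        have hm_l : m ∈ hand.toList := (List.mem_filter.1 hmF).1
        have hm_ne : m ≠ 'J' := by have := (List.mem_filter.1 hmF).2; simpa using this
        have hmaxA : ∀ y ∈ hand.toList.filter (fun x => !(x == 'J')),
            List.count y (hand.toList.filter (fun x => !(x == 'J')))
              ≤ List.count m (hand.toList.filter (fun x => !(x == 'J'))) :=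
          PySem.List.max?_isMax hmax?
        -- A's multiset: the non-'J' tally with m's entry bumped by the joker count
        have hAmap : (PySem.Set.ofList (hand.toList.map (fun x => if x = 'J' then m else x))).map
              (fun c => (List.count c (hand.toList.map (fun x => if x = 'J' then m else x)) : Int))
            = (PySem.Set.ofList (hand.toList.map (fun x => if x = 'J' then m else x))).map
              (fun c => if c = m then (hand.toList.count c : Int) + (hand.toList.count 'J' : Int)
                        else (hand.toList.count c : Int)) := by
          apply List.map_congr_left
          intro c hc
          have hc' : c ∈ hand.toList ∧ c ≠ 'J' :=
            (pv_mem_map_repl _ _ _ _ hm_l hm_ne).1 ((PySem.Set.mem_ofList _ _).1 hc)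
          rw [pv_count_map_repl _ _ _ _ hm_ne, if_neg hc'.2]
          by_cases hcm : c = m
          · rw [if_pos hcm, if_pos hcm]; push_cast; ring
          · rw [if_neg hcm, if_neg hcm]
        rw [hAmap]
        -- B side: cards = sorted filter, jokers = count of 'J'
        have hjok : (hand.toList.length : Int)
            - ((PySem.List.sorted (hand.toList.filter (fun c => !(c == 'J'))) (fun c => c) false).length : Int)
            = (hand.toList.count 'J' : Int) := by
          rw [PySem.List.length_sorted]
          have := pv_len_filterJ hand.toList
          omega
        rw [hjok]
        have hcJpos : 0 < hand.toList.count 'J' := List.count_pos_iff.2 hJ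
        have hjne : ((hand.toList.count 'J' : Int) != 0) = true := by
          simp only [bne_iff_ne, ne_eq, Int.natCast_eq_zero]
          omega
        rw [hjne]
        simp only [if_true]
        -- B's tally list
        rw [pv_btally (hand.toList.filter (fun c => !(c == 'J')))]
        have hmapB : (PySem.Set.ofList (hand.toList.filter (fun c => !(c == 'J')))).map
              (fun c => ((hand.toList.filter (fun c => !(c == 'J'))).count c : Int))
            = (PySem.Set.ofList (hand.toList.filter (fun c => !(c == 'J')))).map
              (fun c => (hand.toList.count c : Int)) := by
          apply List.map_congr_left
          intro c hc
          have hc' := List.mem_filter.1 ((PySem.Set.mem_ofList _ _).1 hc)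
          rw [List.count_filter (p := fun c => !(c == 'J')) hc'.2]
        rw [hmapB]
        -- name F' (distinct non-J cards) and the sorted descending tally s = h :: t
        set F' := PySem.Set.ofList (hand.toList.filter (fun c => !(c == 'J'))) with hF'
        have hmF' : m ∈ F' := (PySem.Set.mem_ofList _ _).2 hmF
        have hsne : PySem.List.sorted (F'.map (fun c => (hand.toList.count c : Int)))
            (fun v => v) true ≠ [] := by
          rw [Ne, PySem.List.sorted_eq_nil_iff, List.map_eq_nil_iff]
          intro h
          rw [h] at hmF'
          exact List.not_mem_nil hmF'
        obtain ⟨h, t, hst⟩ : ∃ h t, PySem.List.sorted (F'.map (fun c => (hand.toList.count c : Int)))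
            (fun v => v) true = h :: t := by
          cases hs : PySem.List.sorted (F'.map (fun c => (hand.toList.count c : Int)))
              (fun v => v) true with
          | nil => exact absurd hs hsne
          | cons h t => exact ⟨h, t, rfl⟩
        rw [hst]
        -- the head h is the maximal count, which is m's count
        have hhead : ∀ y ∈ F'.map (fun c => (hand.toList.count c : Int)), y ≤ h :=
          PySem.List.key_head_sorted_rev_ge _ (fun v : Int => v) hst
        have hhm : h ∈ F'.map (fun c => (hand.toList.count c : Int)) := by
          have : h ∈ PySem.List.sorted (F'.map (fun c => (hand.toList.count c : Int)))
              (fun v => v) true := by rw [hst]; exact List.mem_cons_self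
          exact (PySem.List.mem_sorted _ _ _ _).1 this
        have hmaxm : ∀ y ∈ F'.map (fun c => (hand.toList.count c : Int)),
            y ≤ (hand.toList.count m : Int) := by
          intro y hy
          obtain ⟨c, hc, rfl⟩ := List.mem_map.1 hy
          have hcf := (PySem.Set.mem_ofList _ _).1 hc
          have := hmaxA c hcf
          rw [List.count_filter (p := fun c => !(c == 'J')) (List.mem_filter.1 hcf).2,
            List.count_filter (p := fun c => !(c == 'J')) (by simp [hm_ne])] at this
          exact_mod_cast this
        have hhmEq : h = (hand.toList.count m : Int) :=
          le_antisymm (hmaxm h hhm) (hhead _ (List.mem_map.2 ⟨m, hmF', rfl⟩))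
        -- pairwise facts about the sorted tally
        have hspw : ((h : Int) :: t).Pairwise (fun a b => b ≤ a) := by
          have := PySem.List.sorted_pairwise_rev (F'.map (fun c => (hand.toList.count c : Int)))
            (fun v : Int => v)
          rwa [hst] at this
        -- t is the remaining counts
        have hsp : ((h : Int) :: t).Perm (F'.map (fun c => (hand.toList.count c : Int))) := by
          rw [← hst]
          exact PySem.List.sorted_perm _ _ _
        have htperm : t.Perm ((F'.erase m).map (fun c => (hand.toList.count c : Int))) := by
          have := hsp.trans (pv_map_perm_cons_erase F' (fun c => (hand.toList.count c : Int)) m hmF')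
          rw [hhmEq] at this
          exact this.cons_inv
        -- K (distinct cards of the rebuilt hand) is a rearrangement of F'
        have hKperm : (PySem.Set.ofList (hand.toList.map (fun x => if x = 'J' then m else x))).Perm F' := by
          rw [List.perm_ext_iff_of_nodup (PySem.Set.nodup_ofList _) (PySem.Set.nodup_ofList _)]
          intro x
          rw [PySem.Set.mem_ofList, PySem.Set.mem_ofList,
            pv_mem_map_repl _ _ _ _ hm_l hm_ne, List.mem_filter]
          simp
        -- conclude by uniqueness of the sorted descending list
        apply pv_sortedDesc_eq
        · refine List.Perm.trans ?_
            (pv_bump_perm _ (fun c => (hand.toList.count c : Int)) (hand.toList.count 'J' : Int)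
              m (PySem.Set.nodup_ofList _)
              ((PySem.Set.mem_ofList _ _).2 ((pv_mem_map_repl _ _ _ _ hm_l hm_ne).2 ⟨hm_l, hm_ne⟩))).symm
          rw [hhmEq]
          refine List.Perm.cons _ ?_
          exact htperm.trans ((hKperm.symm.erase m).map _)
        · refine List.Pairwise.cons ?_ hspw.tail
          intro x hx
          have hxh : x ≤ h := List.rel_of_pairwise_cons hspw hx
          have : (0 : Int) ≤ (hand.toList.count 'J' : Int) := by positivity
          omega
      · -- no joker in the hand
        have hA : (PySem.Str.isIn "J" hand && hand != "JJJJJ") = false := by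
          rw [pv_isIn_J]; simp [hJ]
        rw [hA]
        simp only [Bool.false_eq_true, if_false]
        have hfl : hand.toList.filter (fun c => !(c == 'J')) = hand.toList := by
          rw [List.filter_eq_self]
          intro x hx
          simp only [Bool.not_eq_eq_eq_not, Bool.not_true, beq_eq_false_iff_ne, ne_eq]
          intro hxe
          exact hJ (hxe ▸ hx)
        rw [hfl, PySem.List.length_sorted, sub_self, bne_self_eq_false]
        simp only [Bool.false_eq_true, if_false]
        simp only [pv_count_single]
        exact (pv_btally hand.toList).symm
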